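-- pv_equiv track=rewrite | github.com/noperator/google-foobar | 3-3_save-beta-rabbit/solution.py | answer
-- ===== SOURCE A (Python) =====
-- def answer(food, grid):
--
-- 	# get min and max cost paths
-- 	def get_x_grid(row, col, mode):
--
-- 		# if path cost already exists, return it
-- 		if x_grid[row][col][mode]: return x_grid[row][col][mode]
--
-- 		# get cost of current cell
-- 		cost = grid[row][col]
--
-- 		# if reached end of path, return cost
-- 		if row == grid_size and col == grid_size: return cost
--
-- 		# iterate over list comprehension of valid neighboring cells
-- 		for nrow, ncol in [(ncell[0], ncell[1])
--
-- 			# get neighbors of current cell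
-- 			for i, ncell in enumerate([(row+1, col), (row, col+1)])
--
-- 				# ensure neighbor exists
-- 				if ncell[i]-1 != grid_size
--
-- 					# ensure cost path at that neighbor has not yet been checked
-- 					and not x_grid[ncell[0]][ncell[1]][mode]]:
--
-- 						# get cost path for that neighbor
-- 						x_grid[nrow][ncol][mode] = get_x_grid(nrow, ncol, mode)
--
-- 		# if up against a single border, pursue the opposite path
-- 		if   col == grid_size: cost += x_grid[row+1][col][mode]
-- 		elif row == grid_size: cost += x_grid[row][col+1][mode]
--
-- 		# if not up against a border, get min/max cost path
-- 		else:
-- 			sign = 1 - 2 * mode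
-- 			cost += sign * min(sign * x_grid[row][col+1][mode], sign * x_grid[row+1][col][mode])
--
-- 		return cost
--
-- 	# get max cost where cost <= food
-- 	def get_max_cost(row, col, running_cost):
--
-- 		# add cost of current cell to running path cost
-- 		running_cost += grid[row][col]
--
-- 		# if reached end of path, return cost
-- 		if row == grid_size and col == grid_size: return running_cost
--
-- 		# if up against a single border, take the opposite path
-- 		elif col == grid_size: return get_max_cost(row+1, col, running_cost)
-- 		elif row == grid_size: return get_max_cost(row, col+1, running_cost)
--
-- 		# get adjacent min paths plus running cost
-- 		min_right = get_x_grid(row, col+1, 0) + running_cost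
-- 		min_below = get_x_grid(row+1, col, 0) + running_cost
--
-- 		# get adjacent max paths
-- 		max_right = get_x_grid(row, col+1, 1)
-- 		max_below = get_x_grid(row+1, col, 1)
--
-- 		# if no valid path exists, return appropriate value
-- 		if min_right > food and min_below > food: return -1
--
-- 		# if only one path is valid, take that path
-- 		elif min_right > food and min_below <= food: row += 1
-- 		elif min_below > food and min_right <= food: col += 1
--
-- 		# otherwise, both paths are valid, so take the max cost path
-- 		elif max_right < max_below:	row += 1
-- 		else:                       col += 1
--
-- 		# pursue path through next cell
-- 		return get_max_cost(row, col, running_cost)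
--
-- 	# cache grid size
-- 	grid_size = len(grid) - 1
--
-- 	# initialize grid of min/max cost paths
-- 	x_grid = [[[None, None] for x in range(grid_size+1)] for y in range(grid_size+1)]
--
-- 	# get max valid cost
-- 	max_cost = get_max_cost(0,0,0)
--
-- 	# return appropriate value
-- 	return food - max_cost if max_cost >= 0 else -1
-- ===== SOURCE B (Python) =====
-- def answer(food, grid):
--     n = len(grid) - 1
--
--     # build the (min, max) path-cost table bottom-up, row by row from the last row
--     table = []
--     for row_vals in reversed(grid):
--         new = []
--         if not table:
--             # bottom row: each cell only has a right neighbour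
--             for c in range(n, -1, -1):
--                 v = row_vals[c]
--                 if not new:
--                     new = [(v, v)]
--                 else:
--                     m, M = new[0]
--                     new = [(v + m, v + M)] + new
--         else:
--             below = table[0]
--             for c in range(n, -1, -1):
--                 v = row_vals[c]
--                 bm, bM = below[c]
--                 if not new:
--                     new = [(v + bm, v + bM)]
--                 else:
--                     rm, rM = new[0]
--                     new = [(v + min(rm, bm), v + max(rM, bM))] + new
--         table = [new] + table
--
--     # iterative greedy walk from (0,0) using the precomputed table
--     r = c = 0
--     running = 0
--     while True:
--         running += grid[r][c]
--         if r == n and c == n: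
--             max_cost = running
--             break
--         if c == n:
--             r += 1
--         elif r == n:
--             c += 1
--         else:
--             rm, rM = table[r][c + 1]
--             bm, bM = table[r + 1][c]
--             if rm + running > food and bm + running > food:
--                 max_cost = -1
--                 break
--             if bm + running <= food and (rm + running > food or rM < bM):
--                 r += 1
--             else:
--                 c += 1
--
--     return food - max_cost if max_cost >= 0 else -1
-- ===== Notes on version B (the rewrite author's own statement) =====
-- stated objective: alternative
-- what changed: Replaces A's lazily-memoized mutually recursive descent (with a sign trick selecting min vs max and a five-branch greedy recursion) by an explicit bottom-up (min,max)-pair DP table built row by row plus an iterative while-loop walk with a condensed two-branch decision.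
import Mathlib
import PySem

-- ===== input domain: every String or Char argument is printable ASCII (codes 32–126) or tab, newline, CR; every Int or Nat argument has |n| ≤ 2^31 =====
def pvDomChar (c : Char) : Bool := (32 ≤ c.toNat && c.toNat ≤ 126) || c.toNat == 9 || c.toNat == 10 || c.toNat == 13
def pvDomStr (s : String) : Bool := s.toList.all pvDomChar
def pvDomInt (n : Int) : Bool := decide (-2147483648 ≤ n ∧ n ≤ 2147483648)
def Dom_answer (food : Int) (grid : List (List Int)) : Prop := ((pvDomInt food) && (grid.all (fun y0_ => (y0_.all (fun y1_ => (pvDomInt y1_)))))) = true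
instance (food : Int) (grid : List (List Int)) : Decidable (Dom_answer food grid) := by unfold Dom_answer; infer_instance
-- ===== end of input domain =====

-- B replaces A's memoized recursive descent by a bottom-up (min,max) DP table and an
-- iterative walk with a condensed branch (objective: alternative decomposition, same cost).

-- shared in-range indexing helper: grid[r][c] for the nonnegative in-range indices both
-- programs use (out-of-range accesses raise in Python and are excluded by Pre_answer)
def gAt (grid : List (List Int)) (r c : Nat) : Int := (grid.getD r []).getD c 0

-- ===== PORT A =====
-- A's get_x_grid: literal recursion (same branches, same sign trick).  A's x_grid memo
-- cache only stores already-computed values and never changes any returned value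
-- (entries are only ever set to the very value the recursion computes), so the port
-- carries the recursion without the cache; `fuel` only makes the recursion total
-- (2*n+2 always suffices on in-range starts).
def aXGrid (grid : List (List Int)) (n : Nat) (mode : Nat) : Nat → Nat → Nat → Int
  | 0, _, _ => 0
  | fuel+1, r, c =>
    let cost := gAt grid r c
    if r = n ∧ c = n then cost
    else if c = n then cost + aXGrid grid n mode fuel (r+1) c
    else if r = n then cost + aXGrid grid n mode fuel r (c+1)
    else
      let sign : Int := 1 - 2 * (mode : Int)
      cost + sign * min (sign * aXGrid grid n mode fuel r (c+1))
                        (sign * aXGrid grid n mode fuel (r+1) c)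

-- A's get_max_cost: same branch chain, in the same order
def aMaxCost (food : Int) (grid : List (List Int)) (n : Nat) : Nat → Nat → Nat → Int → Int
  | 0, _, _, _ => 0
  | fuel+1, r, c, running =>
    let running := running + gAt grid r c
    if r = n ∧ c = n then running
    else if c = n then aMaxCost food grid n fuel (r+1) c running
    else if r = n then aMaxCost food grid n fuel r (c+1) running
    else
      let min_right := aXGrid grid n 0 (2*n+2) r (c+1) + running
      let min_below := aXGrid grid n 0 (2*n+2) (r+1) c + running
      let max_right := aXGrid grid n 1 (2*n+2) r (c+1)
      let max_below := aXGrid grid n 1 (2*n+2) (r+1) c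
      if min_right > food ∧ min_below > food then -1
      else if min_right > food ∧ min_below ≤ food then aMaxCost food grid n fuel (r+1) c running
      else if min_below > food ∧ min_right ≤ food then aMaxCost food grid n fuel r (c+1) running
      else if max_right < max_below then aMaxCost food grid n fuel (r+1) c running
      else aMaxCost food grid n fuel r (c+1) running

def answer (food : Int) (grid : List (List Int)) : Int :=
  let n := grid.length - 1
  let max_cost := aMaxCost food grid n (2*n+2) 0 0 0
  if max_cost ≥ 0 then food - max_cost else -1

-- ===== PORT B =====
-- bottom row of the (min,max) table: each cell only has a right neighbour
def bRowBot : List Int → List (Int × Int)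
  | [] => []
  | v :: rest =>
    match bRowBot rest with
    | [] => [(v, v)]
    | (m, M) :: t => (v + m, v + M) :: (m, M) :: t

-- interior row, from the grid row zipped with the already-built row below
def bRowMid : List (Int × (Int × Int)) → List (Int × Int)
  | [] => []
  | (v, bm, bM) :: rest =>
    match bRowMid rest with
    | [] => [(v + bm, v + bM)]
    | (rm, rM) :: t => (v + min rm bm, v + max rM bM) :: (rm, rM) :: t

-- table built row by row from the bottom (Source B's reversed(grid) loop); rows are used
-- only up to column n, hence the `take (n+1)` (Source B indexes columns n..0 explicitly)
def bTable (n : Nat) : List (List Int) → List (List (Int × Int))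
  | [] => []
  | g :: rest =>
    match bTable n rest with
    | [] => [bRowBot (g.take (n+1))]
    | below :: t => bRowMid ((g.take (n+1)).zip below) :: below :: t

def tAt (tab : List (List (Int × Int))) (r c : Nat) : Int × Int := (tab.getD r []).getD c (0, 0)

-- Source B's while-loop walk, as a fuel recursion over the same (r, c, running) state
def bWalk (food : Int) (grid : List (List Int)) (tab : List (List (Int × Int))) (n : Nat) :
    Nat → Nat → Nat → Int → Int
  | 0, _, _, _ => 0
  | fuel+1, r, c, running =>
    let running := running + gAt grid r c
    if r = n ∧ c = n then running
    else if c = n then bWalk food grid tab n fuel (r+1) c running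
    else if r = n then bWalk food grid tab n fuel r (c+1) running
    else
      let right := tAt tab r (c+1)
      let below := tAt tab (r+1) c
      if right.1 + running > food ∧ below.1 + running > food then -1
      else if below.1 + running ≤ food ∧ (right.1 + running > food ∨ right.2 < below.2) then
        bWalk food grid tab n fuel (r+1) c running
      else bWalk food grid tab n fuel r (c+1) running

def answer_alt (food : Int) (grid : List (List Int)) : Int :=
  let n := grid.length - 1
  let max_cost := bWalk food grid (bTable n grid) n (2*n+2) 0 0 0
  if max_cost ≥ 0 then food - max_cost else -1

-- ===== PRECONDITION & SPEC =====
-- Pre_ excludes exactly the inputs on which A raises IndexError: the empty grid and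
-- grids with a row shorter than the number of rows.
def Pre_answer (food : Int) (grid : List (List Int)) : Prop :=
  grid ≠ [] ∧ ∀ row ∈ grid, grid.length ≤ row.length
instance (food : Int) (grid : List (List Int)) : Decidable (Pre_answer food grid) := by
  unfold Pre_answer; infer_instance

def pvWitness_answer : Int × List (List Int) := (7, [[0, 2, 5], [1, 3, 1], [4, 2, 1]])

def Spec_answer (food : Int) (grid : List (List Int)) (out : Int) : Prop := out = answer_alt food grid
instance (food : Int) (grid : List (List Int)) (out : Int) : Decidable (Spec_answer food grid out) := by unfold Spec_answer; infer_instance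

-- ===== CLAIM (what is proved, stated in full; the proofs are below) =====
def Claim_equal_answer : Prop := ∀ (food : Int) (grid : List (List Int)), Dom_answer food grid → Pre_answer food grid → Spec_answer food grid (answer food grid)

-- ===== LEMMAS AND PROOFS =====

-- list-access helpers
theorem zip_getD {α β : Type} (l1 : List α) (l2 : List β) (c : Nat) (d1 : α) (d2 : β)
    (h1 : c < l1.length) (h2 : c < l2.length) :
    (l1.zip l2).getD c (d1, d2) = (l1.getD c d1, l2.getD c d2) := by
  induction l1 generalizing l2 c with
  | nil => simp at h1
  | cons a t ih =>
    cases l2 with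
    | nil => simp at h2
    | cons b t2 =>
      cases c with
      | zero => simp
      | succ c => simpa using ih t2 c (by simpa using h1) (by simpa using h2)

theorem take_getD {α : Type} (l : List α) (m c : Nat) (d : α) (h : c < m) :
    (l.take m).getD c d = l.getD c d := by
  induction l generalizing m c with
  | nil => simp
  | cons a t ih =>
    cases m with
    | zero => omega
    | succ m =>
      cases c with
      | zero => simp
      | succ c => simpa using ih m c (by omega)

theorem bRowBot_length (l : List Int) : (bRowBot l).length = l.length := by
  induction l with
  | nil => rfl
  | cons v rest ih =>
    simp only [bRowBot]
    rcases h : bRowBot rest with _ | ⟨⟨m, M⟩, t⟩ <;> simp_all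

theorem bRowMid_length (l : List (Int × (Int × Int))) : (bRowMid l).length = l.length := by
  induction l with
  | nil => rfl
  | cons v rest ih =>
    obtain ⟨v, bm, bM⟩ := v
    simp only [bRowMid]
    rcases h : bRowMid rest with _ | ⟨⟨m, M⟩, t⟩ <;> simp_all

theorem bRowBot_getD_last (l : List Int) (c : Nat) (d : Int × Int) (h : c + 1 = l.length) :
    (bRowBot l).getD c d = (l.getD c 0, l.getD c 0) := by
  induction l generalizing c with
  | nil => simp at h
  | cons v rest ih =>
    cases c with
    | zero =>
      have : rest = [] := by cases rest <;> simp_all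
      subst this; simp [bRowBot]
    | succ c =>
      have h' : c + 1 = rest.length := by simpa using h
      simp only [bRowBot]
      rcases hb : bRowBot rest with _ | ⟨⟨m, M⟩, t⟩
      · exfalso; have := bRowBot_length rest; rw [hb] at this; simp at this; omega
      · simp only [List.getD_cons_succ, List.getD_cons_succ]
        rw [← hb]; exact ih c h'

theorem bRowBot_getD_mid (l : List Int) (c : Nat) (d : Int × Int) (h : c + 1 < l.length) :
    (bRowBot l).getD c d =
      (l.getD c 0 + ((bRowBot l).getD (c+1) d).1, l.getD c 0 + ((bRowBot l).getD (c+1) d).2) := by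
  induction l generalizing c with
  | nil => simp at h
  | cons v rest ih =>
    simp only [bRowBot]
    rcases hb : bRowBot rest with _ | ⟨⟨m, M⟩, t⟩
    · exfalso; have := bRowBot_length rest; rw [hb] at this; simp at this
      simp at h; omega
    · cases c with
      | zero => simp
      | succ c =>
        simp only [List.getD_cons_succ]
        have h2 := ih c (by simpa using h); rw [hb] at h2; simpa using h2

theorem bRowMid_getD_last (l : List (Int × (Int × Int))) (c : Nat) (d : Int × Int)
    (h : c + 1 = l.length) :
    (bRowMid l).getD c d =
      ((l.getD c (0, 0, 0)).1 + (l.getD c (0, 0, 0)).2.1,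
       (l.getD c (0, 0, 0)).1 + (l.getD c (0, 0, 0)).2.2) := by
  induction l generalizing c with
  | nil => simp at h
  | cons p rest ih =>
    obtain ⟨v, bm, bM⟩ := p
    cases c with
    | zero =>
      have : rest = [] := by cases rest <;> simp_all
      subst this; simp [bRowMid]
    | succ c =>
      have h' : c + 1 = rest.length := by simpa using h
      simp only [bRowMid]
      rcases hb : bRowMid rest with _ | ⟨⟨m, M⟩, t⟩
      · exfalso; have := bRowMid_length rest; rw [hb] at this; simp at this; omega
      · simp only [List.getD_cons_succ]
        rw [← hb]; exact ih c h'

theorem bRowMid_getD_mid (l : List (Int × (Int × Int))) (c : Nat) (d : Int × Int)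
    (h : c + 1 < l.length) :
    (bRowMid l).getD c d =
      ((l.getD c (0, 0, 0)).1 + min ((bRowMid l).getD (c+1) d).1 (l.getD c (0, 0, 0)).2.1,
       (l.getD c (0, 0, 0)).1 + max ((bRowMid l).getD (c+1) d).2 (l.getD c (0, 0, 0)).2.2) := by
  induction l generalizing c with
  | nil => simp at h
  | cons p rest ih =>
    obtain ⟨v, bm, bM⟩ := p
    simp only [bRowMid]
    rcases hb : bRowMid rest with _ | ⟨⟨m, M⟩, t⟩
    · exfalso; have := bRowMid_length rest; rw [hb] at this; simp at this
      simp at h; omega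
    · cases c with
      | zero => simp
      | succ c =>
        simp only [List.getD_cons_succ]
        have h2 := ih c (by simpa using h); rw [hb] at h2; simpa using h2

theorem bTable_length (n : Nat) (g : List (List Int)) : (bTable n g).length = g.length := by
  induction g with
  | nil => rfl
  | cons a rest ih =>
    simp only [bTable]
    rcases h : bTable n rest with _ | ⟨below, t⟩ <;> simp_all

theorem bTable_getD_last (n : Nat) (g : List (List Int)) (r : Nat) (h : r + 1 = g.length) :
    (bTable n g).getD r [] = bRowBot ((g.getD r []).take (n+1)) := by
  induction g generalizing r with
  | nil => simp at h
  | cons a rest ih =>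
    cases r with
    | zero =>
      have : rest = [] := by cases rest <;> simp_all
      subst this; simp [bTable]
    | succ r =>
      have h' : r + 1 = rest.length := by simpa using h
      simp only [bTable]
      rcases hb : bTable n rest with _ | ⟨below, t⟩
      · exfalso; have := bTable_length n rest; rw [hb] at this; simp at this; omega
      · simp only [List.getD_cons_succ]
        rw [← hb]; exact ih r h'

theorem bTable_getD_mid (n : Nat) (g : List (List Int)) (r : Nat) (h : r + 1 < g.length) :
    (bTable n g).getD r [] =
      bRowMid (((g.getD r []).take (n+1)).zip ((bTable n g).getD (r+1) [])) := by
  induction g generalizing r with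
  | nil => simp at h
  | cons a rest ih =>
    simp only [bTable]
    rcases hb : bTable n rest with _ | ⟨below, t⟩
    · exfalso; have := bTable_length n rest; rw [hb] at this; simp at this
      simp at h; omega
    · cases r with
      | zero => simp
      | succ r =>
        simp only [List.getD_cons_succ]
        have h2 := ih r (by simpa using h); rw [hb] at h2; simpa using h2

theorem bTable_row_length (n : Nat) (g : List (List Int))
    (hrows : ∀ row ∈ g, n + 1 ≤ row.length) (r : Nat) (h : r < g.length) :
    ((bTable n g).getD r []).length = n + 1 := by
  induction g generalizing r with
  | nil => simp at h
  | cons a rest ih =>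
    have ha : n + 1 ≤ a.length := hrows a (by simp)
    have hrows' : ∀ row ∈ rest, n + 1 ≤ row.length := fun row hm => hrows row (by simp [hm])
    simp only [bTable]
    rcases hb : bTable n rest with _ | ⟨below, t⟩
    · have := bTable_length n rest; rw [hb] at this; simp at this
      have : rest = [] := List.eq_nil_of_length_eq_zero this.symm
      subst this
      cases r with
      | zero => simp [bRowBot_length]; omega
      | succ r => simp at h
    · cases r with
      | zero =>
        have hbl : below.length = n + 1 := by
          have := ih hrows' 0 (by have := bTable_length n rest; rw [hb] at this; simp at this; omega)
          rw [hb] at this; simpa using this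
        simp [bRowMid_length, hbl]; omega
      | succ r =>
        simp only [List.getD_cons_succ]
        rw [← hb]; exact ih hrows' r (by simpa using h)

theorem row_mem (grid : List (List Int)) (n r : Nat) (hn : grid.length = n + 1)
    (hrows : ∀ row ∈ grid, n + 1 ≤ row.length) (hr : r ≤ n) :
    n + 1 ≤ (grid.getD r []).length := by
  have hlt : r < grid.length := by omega
  have : grid.getD r [] ∈ grid := by
    rw [List.getD_eq_getElem _ _ hlt]; exact List.getElem_mem hlt
  exact hrows _ this

theorem take_len (grid : List (List Int)) (n r : Nat) (hn : grid.length = n + 1)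
    (hrows : ∀ row ∈ grid, n + 1 ≤ row.length) (hr : r ≤ n) :
    ((grid.getD r []).take (n+1)).length = n + 1 := by
  have := row_mem grid n r hn hrows hr
  rw [List.length_take]; omega

theorem T_corner (grid : List (List Int)) (n : Nat) (hn : grid.length = n + 1)
    (hrows : ∀ row ∈ grid, n + 1 ≤ row.length) :
    tAt (bTable n grid) n n = (gAt grid n n, gAt grid n n) := by
  unfold tAt
  rw [bTable_getD_last n grid n (by omega)]
  rw [bRowBot_getD_last _ _ _ (by rw [take_len grid n n hn hrows (le_refl n)])]
  rw [take_getD _ _ _ _ (by omega)]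
  rfl

theorem T_lastcol (grid : List (List Int)) (n : Nat) (hn : grid.length = n + 1)
    (hrows : ∀ row ∈ grid, n + 1 ≤ row.length) (r : Nat) (hr : r < n) :
    tAt (bTable n grid) r n =
      (gAt grid r n + (tAt (bTable n grid) (r+1) n).1,
       gAt grid r n + (tAt (bTable n grid) (r+1) n).2) := by
  have hbl : ((bTable n grid).getD (r+1) []).length = n + 1 :=
    bTable_row_length n grid hrows (r+1) (by omega)
  have hzl : (((grid.getD r []).take (n+1)).zip ((bTable n grid).getD (r+1) [])).length = n + 1 := by
    rw [List.length_zip, take_len grid n r hn hrows (by omega), hbl]; omega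
  unfold tAt
  rw [bTable_getD_mid n grid r (by omega)]
  rw [bRowMid_getD_last _ _ _ (by rw [hzl])]
  rw [zip_getD _ _ _ _ _ (by rw [take_len grid n r hn hrows (by omega)]; omega) (by omega)]
  rw [take_getD _ _ _ _ (by omega)]
  rfl

theorem T_botrow (grid : List (List Int)) (n : Nat) (hn : grid.length = n + 1)
    (hrows : ∀ row ∈ grid, n + 1 ≤ row.length) (c : Nat) (hc : c < n) :
    tAt (bTable n grid) n c =
      (gAt grid n c + (tAt (bTable n grid) n (c+1)).1,
       gAt grid n c + (tAt (bTable n grid) n (c+1)).2) := by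
  unfold tAt
  rw [bTable_getD_last n grid n (by omega)]
  rw [bRowBot_getD_mid _ _ _ (by rw [take_len grid n n hn hrows (le_refl n)]; omega)]
  rw [take_getD _ _ _ _ (by omega)]
  rfl

theorem T_mid (grid : List (List Int)) (n : Nat) (hn : grid.length = n + 1)
    (hrows : ∀ row ∈ grid, n + 1 ≤ row.length) (r c : Nat) (hr : r < n) (hc : c < n) :
    tAt (bTable n grid) r c =
      (gAt grid r c + min (tAt (bTable n grid) r (c+1)).1 (tAt (bTable n grid) (r+1) c).1,
       gAt grid r c + max (tAt (bTable n grid) r (c+1)).2 (tAt (bTable n grid) (r+1) c).2) := by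
  have hbl : ((bTable n grid).getD (r+1) []).length = n + 1 :=
    bTable_row_length n grid hrows (r+1) (by omega)
  have hzl : (((grid.getD r []).take (n+1)).zip ((bTable n grid).getD (r+1) [])).length = n + 1 := by
    rw [List.length_zip, take_len grid n r hn hrows (by omega), hbl]; omega
  unfold tAt
  rw [bTable_getD_mid n grid r (by omega)]
  rw [bRowMid_getD_mid _ _ _ (by rw [hzl]; omega)]
  rw [zip_getD _ _ _ _ _ (by rw [take_len grid n r hn hrows (by omega)]; omega) (by omega)]
  rw [take_getD _ _ _ _ (by omega)]
  rw [← bTable_getD_mid n grid r (by omega)]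
  rfl

theorem xgrid_eq_table (grid : List (List Int)) (n : Nat) (hn : grid.length = n + 1)
    (hrows : ∀ row ∈ grid, n + 1 ≤ row.length) :
    ∀ k r c fuel, r ≤ n → c ≤ n → (n - r) + (n - c) ≤ k → k < fuel →
      aXGrid grid n 0 fuel r c = (tAt (bTable n grid) r c).1 ∧
      aXGrid grid n 1 fuel r c = (tAt (bTable n grid) r c).2 := by
  intro k
  induction k with
  | zero =>
    intro r c fuel hr hc hm hf
    have hrn : r = n := by omega
    have hcn : c = n := by omega
    subst hrn
    cases fuel with
    | zero => omega
    | succ f => simp [aXGrid, hcn, T_corner grid r hn hrows]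
  | succ k ih =>
    intro r c fuel hr hc hm hf
    cases fuel with
    | zero => omega
    | succ f =>
      by_cases hco : r = n ∧ c = n
      · obtain ⟨h1, h2⟩ := hco
        subst h1
        simp [aXGrid, h2, T_corner grid r hn hrows]
      · by_cases hcn : c = n
        · have hrlt : r < n := by
            rcases Nat.lt_or_ge r n with h | h
            · exact h
            · exact absurd ⟨by omega, hcn⟩ hco
          subst hcn
          obtain ⟨i1, i2⟩ := ih (r+1) c f (by omega) hc (by omega) (by omega)
          have hrn : ¬ r = c := by omega
          simp [aXGrid, hrn, i1, i2, T_lastcol grid c hn hrows r hrlt]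
        · by_cases hrn : r = n
          · have hclt : c < n := by omega
            subst hrn
            obtain ⟨i1, i2⟩ := ih r (c+1) f (le_refl r) (by omega) (by omega) (by omega)
            simp [aXGrid, hcn, i1, i2, T_botrow grid r hn hrows c hclt]
          · have hrlt : r < n := by omega
            have hclt : c < n := by omega
            obtain ⟨r1, r2⟩ := ih r (c+1) f hr (by omega) (by omega) (by omega)
            obtain ⟨b1, b2⟩ := ih (r+1) c f (by omega) hc (by omega) (by omega)
            simp [aXGrid, hrn, hcn, r1, r2, b1, b2, T_mid grid n hn hrows r c hrlt hclt]

theorem walk_eq (food : Int) (grid : List (List Int)) (n : Nat) (hn : grid.length = n + 1)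
    (hrows : ∀ row ∈ grid, n + 1 ≤ row.length) :
    ∀ k r c running fuel, r ≤ n → c ≤ n → (n - r) + (n - c) ≤ k → k < fuel →
      aMaxCost food grid n fuel r c running =
        bWalk food grid (bTable n grid) n fuel r c running := by
  intro k
  induction k with
  | zero =>
    intro r c running fuel hr hc hm hf
    have hrn : r = n := by omega
    have hcn : c = n := by omega
    subst hrn
    cases fuel with
    | zero => omega
    | succ f => simp [aMaxCost, bWalk, hcn]
  | succ k ih =>
    intro r c running fuel hr hc hm hf
    cases fuel with
    | zero => omega
    | succ f =>
      by_cases hco : r = n ∧ c = n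
      · obtain ⟨h1, h2⟩ := hco
        subst h1
        simp [aMaxCost, bWalk, h2]
      · by_cases hcn : c = n
        · have hrlt : r < n := by
            rcases Nat.lt_or_ge r n with h | h
            · exact h
            · exact absurd ⟨by omega, hcn⟩ hco
          subst hcn
          have hrn : ¬ r = c := by omega
          have ihD := ih (r+1) c (running + gAt grid r c) f (by omega) hc (by omega) (by omega)
          simp [aMaxCost, bWalk, hrn, ihD]
        · by_cases hrn : r = n
          · subst hrn
            have ihR := ih r (c+1) (running + gAt grid r c) f (le_refl r) (by omega) (by omega) (by omega)
            simp [aMaxCost, bWalk, hcn, ihR]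
          · have hrlt : r < n := by omega
            have hclt : c < n := by omega
            have hR := xgrid_eq_table grid n hn hrows (2*n+1) r (c+1) (2*n+2)
              hr (by omega) (by omega) (by omega)
            have hB := xgrid_eq_table grid n hn hrows (2*n+1) (r+1) c (2*n+2)
              (by omega) hc (by omega) (by omega)
            have ihD := ih (r+1) c (running + gAt grid r c) f (by omega) hc (by omega) (by omega)
            have ihR := ih r (c+1) (running + gAt grid r c) f hr (by omega) (by omega) (by omega)
            simp only [aMaxCost, bWalk, hR.1, hR.2, hB.1, hB.2, ihD, ihR]
            rw [if_neg hco, if_neg hco, if_neg hcn, if_neg hcn, if_neg hrn, if_neg hrn]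
            split_ifs <;> first | rfl | omega

-- ===== VERDICT (by name: the statement is the Claim_ definition above) =====
theorem answer_spec : Claim_equal_answer := by
  intro food grid _ hpre
  obtain ⟨hne, hrows⟩ := hpre
  have hlen : 1 ≤ grid.length := by cases grid; exact absurd rfl hne; simp
  have hn : grid.length = (grid.length - 1) + 1 := by omega
  have hrows' : ∀ row ∈ grid, (grid.length - 1) + 1 ≤ row.length := by
    intro row hrow; have := hrows row hrow; omega
  simp only [Spec_answer, answer, answer_alt]
  rw [walk_eq food grid (grid.length - 1) hn hrows'
    (2 * (grid.length - 1) + 1) 0 0 0 (2 * (grid.length - 1) + 2)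
    (by omega) (by omega) (by omega) (by omega)]
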